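-- pv_equiv track=rewrite | github.com/eden-avidan/llm_dc_topologies | simai/process_moe_workloads.py | extract_pp_only_matrix
-- ===== SOURCE A (Python) =====
-- def extract_pp_only_matrix(full_matrix, config):
--     """Extract PP-only communication from full matrix."""
--     n_gpus = config["world_size"]
--     tp_size = config["tp"]
--     pp_size = config["pp"]
--     dp_size = n_gpus // (tp_size * pp_size)
--
--     pp_matrix = [[0] * n_gpus for _ in range(n_gpus)]
--
--     gpus_per_stage = tp_size * dp_size
--
--     # PP communication is between adjacent stages at same TP/DP position
--     for pp_i in range(pp_size):
--         for pp_j in range(pp_size):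
--             if abs(pp_i - pp_j) == 1:  # Adjacent stages
--                 stage_i_start = pp_i * gpus_per_stage
--                 stage_j_start = pp_j * gpus_per_stage
--
--                 # Copy communication between all GPUs at same position
--                 for offset in range(gpus_per_stage):
--                     src = stage_i_start + offset
--                     dst = stage_j_start + offset
--                     if src < n_gpus and dst < n_gpus:
--                         pp_matrix[src][dst] = full_matrix[src][dst]
--
--     return pp_matrix
-- ===== SOURCE B (Python) =====
-- def extract_pp_only_matrix(full_matrix, config):
--     """Extract PP-only communication from full matrix."""
--     n_gpus = config["world_size"]
--     tp_size = config["tp"]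
--     pp_size = config["pp"]
--     gpus_per_stage = tp_size * (n_gpus // (tp_size * pp_size))
--
--     def keep(i, j):
--         # cell (i, j) is PP traffic iff i and j sit at the same offset of
--         # two adjacent pipeline stages (both stages within the pp range)
--         return (gpus_per_stage > 0
--                 and i % gpus_per_stage == j % gpus_per_stage
--                 and i // gpus_per_stage < pp_size
--                 and j // gpus_per_stage < pp_size
--                 and abs(i // gpus_per_stage - j // gpus_per_stage) == 1)
--
--     return [[full_matrix[i][j] if keep(i, j) else 0 for j in range(n_gpus)]
--             for i in range(n_gpus)]
-- ===== Notes on version B (the rewrite author's own statement) =====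
-- stated objective: simpler
-- what changed: Replaces A's triple loop that mutates a preallocated zero matrix (scanning all stage pairs and filtering |pp_i-pp_j|==1) by a nested comprehension that builds each cell directly from a closed-form div/mod adjacency predicate on the two GPU indices.
import Mathlib
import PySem

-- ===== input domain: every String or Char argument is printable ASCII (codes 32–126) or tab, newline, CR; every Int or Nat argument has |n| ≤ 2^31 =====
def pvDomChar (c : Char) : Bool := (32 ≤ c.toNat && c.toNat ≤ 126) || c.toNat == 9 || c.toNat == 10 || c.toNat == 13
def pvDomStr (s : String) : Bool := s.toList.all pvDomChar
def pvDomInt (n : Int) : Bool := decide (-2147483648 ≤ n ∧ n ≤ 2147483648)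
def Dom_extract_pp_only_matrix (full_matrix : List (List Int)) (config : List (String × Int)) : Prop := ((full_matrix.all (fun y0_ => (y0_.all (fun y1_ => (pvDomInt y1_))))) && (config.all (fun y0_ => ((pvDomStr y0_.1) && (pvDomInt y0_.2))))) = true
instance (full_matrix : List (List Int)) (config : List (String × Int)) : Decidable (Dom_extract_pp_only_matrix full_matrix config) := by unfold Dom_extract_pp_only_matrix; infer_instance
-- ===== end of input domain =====

-- B replaces A's triple mutate-in-place loop over stage pairs by a nested comprehension that
-- decides each cell directly with a closed-form div/mod adjacency predicate (objective: simpler).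

-- ===== PORT A =====
def extract_pp_only_matrix (full_matrix : List (List Int)) (config : List (String × Int)) : List (List Int) :=
  let cfg := PySem.Dict.ofList config
  let n_gpus := cfg.getD "world_size" 0
  let tp_size := cfg.getD "tp" 0
  let pp_size := cfg.getD "pp" 0
  let dp_size := PySem.Int.floordiv n_gpus (tp_size * pp_size)
  let pp_matrix := (PySem.List.pyRange 0 n_gpus 1).map (fun _ => List.replicate n_gpus.toNat (0 : Int))
  let gpus_per_stage := tp_size * dp_size
  (PySem.List.pyRange 0 pp_size 1).foldl (fun M pp_i =>
    (PySem.List.pyRange 0 pp_size 1).foldl (fun M pp_j =>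
      if (pp_i - pp_j).natAbs = 1 then
        let stage_i_start := pp_i * gpus_per_stage
        let stage_j_start := pp_j * gpus_per_stage
        (PySem.List.pyRange 0 gpus_per_stage 1).foldl (fun M off =>
          let src := stage_i_start + off
          let dst := stage_j_start + off
          if src < n_gpus ∧ dst < n_gpus then
            PySem.List.pySetD M src
              (PySem.List.pySetD (PySem.List.pyGetD M src [])
                dst (PySem.List.pyGetD (PySem.List.pyGetD full_matrix src []) dst 0))
          else M) M
      else M) M) pp_matrix

-- ===== PORT B =====
def extract_pp_only_matrix_alt (full_matrix : List (List Int)) (config : List (String × Int)) : List (List Int) :=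
  let cfg := PySem.Dict.ofList config
  let n_gpus := cfg.getD "world_size" 0
  let tp_size := cfg.getD "tp" 0
  let pp_size := cfg.getD "pp" 0
  let gpus_per_stage := tp_size * PySem.Int.floordiv n_gpus (tp_size * pp_size)
  let keep := fun (i j : Int) =>
    0 < gpus_per_stage ∧
    PySem.Int.mod i gpus_per_stage = PySem.Int.mod j gpus_per_stage ∧
    PySem.Int.floordiv i gpus_per_stage < pp_size ∧
    PySem.Int.floordiv j gpus_per_stage < pp_size ∧
    (PySem.Int.floordiv i gpus_per_stage - PySem.Int.floordiv j gpus_per_stage).natAbs = 1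
  (PySem.List.pyRange 0 n_gpus 1).map (fun i =>
    (PySem.List.pyRange 0 n_gpus 1).map (fun j =>
      if keep i j then PySem.List.pyGetD (PySem.List.pyGetD full_matrix i []) j 0 else 0))

-- ===== PRECONDITION & SPEC =====
-- Pre_ = exactly the inputs where the Python A returns: the three config keys are present,
-- tp*pp ≠ 0 (else ZeroDivisionError), and every full_matrix cell the copy loop reads exists
-- (else IndexError).
def Pre_extract_pp_only_matrix (full_matrix : List (List Int)) (config : List (String × Int)) : Prop :=
  let cfg := PySem.Dict.ofList config
  ((cfg.get? "world_size").isSome ∧ (cfg.get? "tp").isSome ∧ (cfg.get? "pp").isSome) ∧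
  (let n := cfg.getD "world_size" 0
   let tp := cfg.getD "tp" 0
   let pp := cfg.getD "pp" 0
   tp * pp ≠ 0 ∧
   (let g := (tp * PySem.Int.floordiv n (tp * pp)).toNat
    ∀ a ∈ List.range (pp - 1).toNat, ∀ o ∈ List.range g,
      ((a * g + o + g : Int) < n →
        a * g + o < full_matrix.length ∧ a * g + o + g < full_matrix.length ∧
        a * g + o + g < (full_matrix.getD (a * g + o) []).length ∧
        a * g + o < (full_matrix.getD (a * g + o + g) []).length)))
instance (full_matrix : List (List Int)) (config : List (String × Int)) : Decidable (Pre_extract_pp_only_matrix full_matrix config) := by unfold Pre_extract_pp_only_matrix; infer_instance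

def pvWitness_extract_pp_only_matrix : List (List Int) × (List (String × Int)) :=
  ([[1, 2], [3, 4]], [("world_size", 2), ("tp", 1), ("pp", 2)])

def Spec_extract_pp_only_matrix (full_matrix : List (List Int)) (config : List (String × Int)) (out : List (List Int)) : Prop := out = extract_pp_only_matrix_alt full_matrix config
instance (full_matrix : List (List Int)) (config : List (String × Int)) (out : List (List Int)) : Decidable (Spec_extract_pp_only_matrix full_matrix config out) := by unfold Spec_extract_pp_only_matrix; infer_instance

-- ===== CLAIM (what is proved, stated in full; the proofs are below) =====
def Claim_equal_extract_pp_only_matrix : Prop := ∀ (full_matrix : List (List Int)) (config : List (String × Int)), Dom_extract_pp_only_matrix full_matrix config → Pre_extract_pp_only_matrix full_matrix config → Spec_extract_pp_only_matrix full_matrix config (extract_pp_only_matrix full_matrix config)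

-- ===== LEMMAS AND PROOFS =====

-- one write of A's copy loop: M[p.1][p.2] = v p
def pvWStep (v : Int × Int → Int) (M : List (List Int)) (p : Int × Int) : List (List Int) :=
  PySem.List.pySetD M p.1
    (PySem.List.pySetD (PySem.List.pyGetD M p.1 []) p.2 (v p))

-- the (src, dst) pairs A's triple loop visits, in visiting order
def pvPairs (pp g n : Int) : List (Int × Int) :=
  (PySem.List.pyRange 0 pp 1).flatMap fun ppi =>
    (PySem.List.pyRange 0 pp 1).flatMap fun ppj =>
      if (ppi - ppj).natAbs = 1 then
        ((PySem.List.pyRange 0 g 1).map (fun off => (ppi * g + off, ppj * g + off))).filter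
          (fun p => decide (p.1 < n ∧ p.2 < n))
      else []

def pvCell (M : List (List Int)) (a b : Nat) : Int := (M.getD a []).getD b 0

theorem pvPairs_nonneg (pp g n : Int) (p : Int × Int) (hp : p ∈ pvPairs pp g n) :
    0 ≤ p.1 ∧ 0 ≤ p.2 := by
  simp only [pvPairs, List.mem_flatMap, List.mem_ite_nil_right, List.mem_filter,
    List.mem_map, PySem.List.mem_pyRange_one] at hp
  obtain ⟨ppi, ⟨h0i, -⟩, ppj, ⟨h0j, -⟩, -, ⟨off, ⟨h0o, hog⟩, rfl⟩, -⟩ := hp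
  constructor <;> simp only [] <;> nlinarith

theorem pvWStep_length (v : Int × Int → Int) (M : List (List Int)) (p : Int × Int) :
    (pvWStep v M p).length = M.length := by
  simp [pvWStep, PySem.List.length_pySetD]

theorem pvFoldl_pvWStep_length (v : Int × Int → Int) (L : List (Int × Int)) (M : List (List Int)) :
    (L.foldl (pvWStep v) M).length = M.length := by
  induction L generalizing M with
  | nil => rfl
  | cons p L ih => simp [List.foldl_cons, ih, pvWStep_length]

theorem pvWStep_rowlen (v : Int × Int → Int) (M : List (List Int)) (p : Int × Int)
    (h1 : 0 ≤ p.1) (k : Nat) :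
    ((pvWStep v M p).getD k []).length = (M.getD k []).length := by
  obtain ⟨i, j⟩ := p
  have h1' : 0 ≤ i := h1
  simp only [pvWStep]
  rw [← Int.toNat_of_nonneg h1']
  simp only [PySem.List.pySetD_natCast, PySem.List.pyGetD_natCast,
    List.getD_eq_getElem?_getD, List.getElem?_set]
  split
  · next h =>
    subst h
    by_cases hlt : i.toNat < M.length
    · simp [hlt, PySem.List.length_pySetD]
    · simp [hlt]
  · rfl

theorem pvFoldl_pvWStep_rowlen (v : Int × Int → Int) (L : List (Int × Int)) (M : List (List Int))
    (hL : ∀ p ∈ L, 0 ≤ p.1 ∧ 0 ≤ p.2) (k : Nat) :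
    ((L.foldl (pvWStep v) M).getD k []).length = (M.getD k []).length := by
  induction L generalizing M with
  | nil => rfl
  | cons p L ih =>
      rw [List.foldl_cons, ih _ (fun q hq => hL q (List.mem_cons_of_mem _ hq)),
        pvWStep_rowlen v M p (hL p List.mem_cons_self).1]

theorem pvSetRow_getD (row : List Int) (j b : Nat) (w : Int) :
    ((row.set j w).getD b 0) = if b = j ∧ j < row.length then w else row.getD b 0 := by
  by_cases hj : j < row.length
  · by_cases hb : b = j
    · subst hb; simp [List.getD_eq_getElem?_getD, hj]
    · simp [List.getD_eq_getElem?_getD, hb, Ne.symm hb, hj]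
  · rw [List.set_eq_of_length_le (le_of_not_gt hj)]
    simp [hj]

theorem pvSet_cell (M : List (List Int)) (r : List Int) (t a b : Nat) :
    (((M.set t r).getD a []).getD b 0) =
      if a = t ∧ t < M.length then r.getD b 0 else (M.getD a []).getD b 0 := by
  by_cases ht : t < M.length
  · by_cases ha : a = t
    · subst ha; simp [List.getD_eq_getElem?_getD, ht]
    · simp [List.getD_eq_getElem?_getD, ha, Ne.symm ha, ht]
  · rw [List.set_eq_of_length_le (le_of_not_gt ht)]
    simp [ht]

theorem pvWStep_cell_nat (v' : Int) (M : List (List Int)) (t u a b : Nat) :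
    ((M.set t ((M.getD t []).set u v')).getD a []).getD b 0 =
      if a = t ∧ b = u ∧ a < M.length ∧ b < (M.getD a []).length then v'
      else (M.getD a []).getD b 0 := by
  rw [pvSet_cell]
  by_cases hA : a = t ∧ t < M.length
  · obtain ⟨rfl, hlen⟩ := hA
    rw [pvSetRow_getD]
    by_cases hB : b = u ∧ u < (M.getD a []).length
    · obtain ⟨rfl, hu⟩ := hB
      simp [hlen]
    · have hno : ¬(a = a ∧ b = u ∧ a < M.length ∧ b < (M.getD a []).length) := by
        intro hc
        exact hB ⟨hc.2.1, hc.2.1 ▸ hc.2.2.2⟩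
      rw [if_neg hB, if_neg hno]
      simp
  · have hno : ¬(a = t ∧ b = u ∧ a < M.length ∧ b < (M.getD a []).length) := by
      intro hc
      exact hA ⟨hc.1, hc.1 ▸ hc.2.2.1⟩
    rw [if_neg hA, if_neg hno]

theorem pvWStep_cell (v : Int × Int → Int) (M : List (List Int)) (p : Int × Int)
    (h1 : 0 ≤ p.1) (h2 : 0 ≤ p.2) (a b : Nat) :
    pvCell (pvWStep v M p) a b =
      if (a : Int) = p.1 ∧ (b : Int) = p.2 ∧ a < M.length ∧ b < (M.getD a []).length
      then v p else pvCell M a b := by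
  obtain ⟨i, j⟩ := p
  have h1' : 0 ≤ i := h1
  have h2' : 0 ≤ j := h2
  have hi : i = (i.toNat : Int) := (Int.toNat_of_nonneg h1').symm
  have hj : j = (j.toNat : Int) := (Int.toNat_of_nonneg h2').symm
  simp only [pvWStep, pvCell]
  rw [hi, hj]
  simp only [PySem.List.pySetD_natCast, PySem.List.pyGetD_natCast]
  rw [pvWStep_cell_nat]
  simp only [Nat.cast_inj]

theorem pvFoldl_pvWStep_cell (v : Int × Int → Int) (L : List (Int × Int)) (M : List (List Int))
    (hL : ∀ p ∈ L, 0 ≤ p.1 ∧ 0 ≤ p.2) (a b : Nat)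
    (ha : a < M.length) (hb : b < (M.getD a []).length) :
    pvCell (L.foldl (pvWStep v) M) a b =
      if ((a : Int), (b : Int)) ∈ L then v ((a : Int), (b : Int)) else pvCell M a b := by
  induction L generalizing M with
  | nil => simp
  | cons p L ih =>
      have hp := hL p List.mem_cons_self
      have hL' : ∀ q ∈ L, 0 ≤ q.1 ∧ 0 ≤ q.2 := fun q hq => hL q (List.mem_cons_of_mem _ hq)
      rw [List.foldl_cons,
        ih _ hL' (by rw [pvWStep_length]; exact ha)
          (by rw [pvWStep_rowlen v M p hp.1]; exact hb),
        pvWStep_cell v M p hp.1 hp.2 a b]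
      by_cases hmem : ((a : Int), (b : Int)) ∈ L
      · simp [hmem]
      · rw [if_neg hmem]
        by_cases heq : ((a : Int), (b : Int)) = p
        · subst heq
          rw [if_pos ⟨rfl, rfl, ha, hb⟩, if_pos List.mem_cons_self]
        · have hc : ¬((a : Int) = p.1 ∧ (b : Int) = p.2 ∧ a < M.length ∧ b < (M.getD a []).length) :=
            fun h => heq (Prod.ext h.1 h.2.1)
          rw [if_neg hc, if_neg (by simp [heq, hmem])]

-- A's triple loop is the fold of pvWStep over pvPairs
theorem pvA_as_pairs (fm : List (List Int)) (n pp g : Int) (M0 : List (List Int)) :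
    ((PySem.List.pyRange 0 pp 1).foldl (fun M pp_i =>
      (PySem.List.pyRange 0 pp 1).foldl (fun M pp_j =>
        if (pp_i - pp_j).natAbs = 1 then
          (PySem.List.pyRange 0 g 1).foldl (fun M off =>
            if pp_i * g + off < n ∧ pp_j * g + off < n then
              PySem.List.pySetD M (pp_i * g + off)
                (PySem.List.pySetD (PySem.List.pyGetD M (pp_i * g + off) [])
                  (pp_j * g + off)
                  (PySem.List.pyGetD (PySem.List.pyGetD fm (pp_i * g + off) []) (pp_j * g + off) 0))
            else M) M
        else M) M) M0)
    = (pvPairs pp g n).foldl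
        (pvWStep (fun p => PySem.List.pyGetD (PySem.List.pyGetD fm p.1 []) p.2 0)) M0 := by
  rw [pvPairs, List.foldl_flatMap]
  congr 1
  funext M pp_i
  rw [List.foldl_flatMap]
  congr 1
  funext M pp_j
  by_cases h : (pp_i - pp_j).natAbs = 1
  · rw [if_pos h, if_pos h, List.filter_map, List.foldl_map, List.foldl_filter]
    congr 1
    funext M off
    simp only [Function.comp_apply, decide_eq_true_eq, pvWStep]
  · rw [if_neg h, if_neg h]
    rfl

theorem pvMem_pvPairs (pp g n : Int) (a b : Nat) (ha : (a : Int) < n) (hb : (b : Int) < n) :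
    (((a : Int), (b : Int)) ∈ pvPairs pp g n) ↔
      (0 < g ∧ PySem.Int.mod (a : Int) g = PySem.Int.mod (b : Int) g ∧
        PySem.Int.floordiv (a : Int) g < pp ∧ PySem.Int.floordiv (b : Int) g < pp ∧
        (PySem.Int.floordiv (a : Int) g - PySem.Int.floordiv (b : Int) g).natAbs = 1) := by
  simp only [pvPairs, List.mem_flatMap, List.mem_ite_nil_right, List.mem_filter,
    List.mem_map, PySem.List.mem_pyRange_one, decide_eq_true_eq, Prod.mk.injEq]
  constructor
  · rintro ⟨ppi, ⟨h0i, hip⟩, ppj, ⟨h0j, hjp⟩, habs, ⟨off, ⟨h0o, hog⟩, hea, heb⟩, -⟩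
    have hg : 0 < g := lt_of_le_of_lt h0o hog
    have hca : ppi * g + off = off + g * ppi := by ring
    have hcb : ppj * g + off = off + g * ppj := by ring
    have hda : PySem.Int.floordiv (a : Int) g = ppi := by
      rw [PySem.Int.floordiv_eq_ediv_of_pos hg, ← hea, hca,
        Int.add_mul_ediv_left _ _ (ne_of_gt hg), Int.ediv_eq_zero_of_lt h0o hog, zero_add]
    have hdb : PySem.Int.floordiv (b : Int) g = ppj := by
      rw [PySem.Int.floordiv_eq_ediv_of_pos hg, ← heb, hcb,
        Int.add_mul_ediv_left _ _ (ne_of_gt hg), Int.ediv_eq_zero_of_lt h0o hog, zero_add]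
    have hma : PySem.Int.mod (a : Int) g = off := by
      rw [PySem.Int.mod_eq_emod_of_pos hg, ← hea, hca, Int.add_mul_emod_self_left,
        Int.emod_eq_of_lt h0o hog]
    have hmb : PySem.Int.mod (b : Int) g = off := by
      rw [PySem.Int.mod_eq_emod_of_pos hg, ← heb, hcb, Int.add_mul_emod_self_left,
        Int.emod_eq_of_lt h0o hog]
    exact ⟨hg, by rw [hma, hmb], by rw [hda]; exact hip, by rw [hdb]; exact hjp,
      by rw [hda, hdb]; exact habs⟩
  · rintro ⟨hg, hmod, hfa, hfb, habs⟩
    have hgne : g ≠ 0 := ne_of_gt hg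
    simp only [PySem.Int.floordiv_eq_ediv_of_pos hg] at hfa hfb habs
    rw [PySem.Int.mod_eq_emod_of_pos hg, PySem.Int.mod_eq_emod_of_pos hg] at hmod
    refine ⟨(a : Int) / g, ⟨Int.ediv_nonneg (by positivity) (le_of_lt hg), hfa⟩,
      (b : Int) / g, ⟨Int.ediv_nonneg (by positivity) (le_of_lt hg), hfb⟩, habs,
      ⟨(a : Int) % g, ⟨Int.emod_nonneg _ hgne, Int.emod_lt_of_pos _ hg⟩, ?_, ?_⟩, ha, hb⟩
    · rw [mul_comm]
      exact Int.mul_ediv_add_emod _ _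
    · rw [hmod, mul_comm]
      exact Int.mul_ediv_add_emod _ _

theorem pvPPM_row (n : Int) (k : Nat) (hk : k < n.toNat) :
    ((PySem.List.pyRange 0 n 1).map (fun _ => List.replicate n.toNat (0 : Int))).getD k []
      = List.replicate n.toNat 0 := by
  have hlen : k < ((PySem.List.pyRange 0 n 1).map
      (fun _ => List.replicate n.toNat (0 : Int))).length := by
    simp only [List.length_map, PySem.List.length_pyRange_one]
    omega
  rw [List.getD_eq_getElem _ [] hlen, List.getElem_map]

theorem pvPPM_cell (n : Int) (a b : Nat) :
    pvCell ((PySem.List.pyRange 0 n 1).map (fun _ => List.replicate n.toNat (0 : Int))) a b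
      = 0 := by
  simp only [pvCell, List.getD_eq_getElem?_getD, List.getElem?_map]
  cases (PySem.List.pyRange 0 n 1)[a]? with
  | none => rfl
  | some x =>
      simp only [Option.map_some, Option.getD_some, List.getElem?_replicate]
      split <;> rfl

theorem pvMain (fm : List (List Int)) (pp g n : Int) :
    ((PySem.List.pyRange 0 pp 1).foldl (fun M pp_i =>
      (PySem.List.pyRange 0 pp 1).foldl (fun M pp_j =>
        if (pp_i - pp_j).natAbs = 1 then
          (PySem.List.pyRange 0 g 1).foldl (fun M off =>
            if pp_i * g + off < n ∧ pp_j * g + off < n then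
              PySem.List.pySetD M (pp_i * g + off)
                (PySem.List.pySetD (PySem.List.pyGetD M (pp_i * g + off) [])
                  (pp_j * g + off)
                  (PySem.List.pyGetD (PySem.List.pyGetD fm (pp_i * g + off) [])
                    (pp_j * g + off) 0))
            else M) M
        else M) M)
      ((PySem.List.pyRange 0 n 1).map (fun _ => List.replicate n.toNat (0 : Int))))
    = (PySem.List.pyRange 0 n 1).map (fun i =>
        (PySem.List.pyRange 0 n 1).map (fun j =>
          if 0 < g ∧ PySem.Int.mod i g = PySem.Int.mod j g ∧
              PySem.Int.floordiv i g < pp ∧ PySem.Int.floordiv j g < pp ∧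
              (PySem.Int.floordiv i g - PySem.Int.floordiv j g).natAbs = 1
          then PySem.List.pyGetD (PySem.List.pyGetD fm i []) j 0 else 0)) := by
  rw [pvA_as_pairs fm n pp g]
  have hnonneg : ∀ p ∈ pvPairs pp g n, 0 ≤ p.1 ∧ 0 ≤ p.2 :=
    fun p hp => pvPairs_nonneg pp g n p hp
  set v := fun p : Int × Int => PySem.List.pyGetD (PySem.List.pyGetD fm p.1 []) p.2 0 with hv
  set M0 := (PySem.List.pyRange 0 n 1).map (fun _ => List.replicate n.toNat (0 : Int)) with hM0
  set X := (pvPairs pp g n).foldl (pvWStep v) M0 with hX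
  have hM0len : M0.length = n.toNat := by
    rw [hM0]
    simp only [List.length_map, PySem.List.length_pyRange_one]
    omega
  have hXlen : X.length = n.toNat := by
    rw [hX, pvFoldl_pvWStep_length, hM0len]
  apply List.ext_getElem
  · rw [hXlen]
    simp only [List.length_map, PySem.List.length_pyRange_one]
    omega
  · intro k h1 h2
    have hk : k < n.toNat := by rw [hXlen] at h1; exact h1
    have hkn : (k : Int) < n := by omega
    have hM0row : M0.getD k [] = List.replicate n.toNat 0 := by
      rw [hM0]; exact pvPPM_row n k hk
    have hXrow : (X.getD k []).length = n.toNat := by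
      rw [hX, pvFoldl_pvWStep_rowlen v _ _ hnonneg, hM0row, List.length_replicate]
    have hXk : X[k] = X.getD k [] := (List.getD_eq_getElem _ [] h1).symm
    apply List.ext_getElem
    · rw [hXk, hXrow]
      simp only [List.getElem_map, List.length_map, PySem.List.length_pyRange_one]
      omega
    · intro m hm1 hm2
      have hm : m < n.toNat := by rw [hXk, hXrow] at hm1; exact hm1
      have hmn : (m : Int) < n := by omega
      have e1 : X[k][m] = pvCell X k m := by
        unfold pvCell
        rw [← hXk, List.getD_eq_getElem _ (0 : Int) hm1]
      rw [e1, hX, pvFoldl_pvWStep_cell v _ _ hnonneg k m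
          (by rw [hM0len]; exact hk) (by rw [hM0row, List.length_replicate]; exact hm)]
      have e2 : pvCell M0 k m = 0 := by rw [hM0]; exact pvPPM_cell n k m
      rw [e2]
      simp only [pvMem_pvPairs pp g n k m hkn hmn, List.getElem_map,
        PySem.List.getElem_pyRange_one, zero_add, hv]

-- ===== VERDICT (by name: the statement is the Claim_ definition above) =====
theorem extract_pp_only_matrix_spec : Claim_equal_extract_pp_only_matrix := by
  intro fm config _ _
  exact pvMain fm ((PySem.Dict.ofList config).getD "pp" 0)
    ((PySem.Dict.ofList config).getD "tp" 0 *
      PySem.Int.floordiv ((PySem.Dict.ofList config).getD "world_size" 0)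
        ((PySem.Dict.ofList config).getD "tp" 0 * (PySem.Dict.ofList config).getD "pp" 0))
    ((PySem.Dict.ofList config).getD "world_size" 0)
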